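-- pv_equiv track=rewrite | github.com/yydaily/project-euler-solution | code/112/solution.py | check
-- ===== SOURCE A (Python) =====
-- def check(a):
--     while a > 100 and a % 10 == (a // 10) % 10:
--         a //= 10
--     if a <= 100:
--         return 0
--     if a % 10 > (a // 10) % 10:
--         last = a % 10
--         while a > 0:
--             if a % 10 > last:
--                 return 1
--             last = a % 10
--             a //= 10
--     else:
--         last = a % 10
--         while a > 0:
--             if a % 10 < last:
--                 return 1
--             last = a % 10
--             a //= 10
--     return 0
-- ===== SOURCE B (Python) =====
-- def check(a):
--     if a <= 100:
--         return 0
--     digits = []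
--     n = a
--     while n > 0:
--         digits.append(n % 10)
--         n //= 10
--     nondec = all(x >= y for x, y in zip(digits, digits[1:]))
--     noninc = all(x <= y for x, y in zip(digits, digits[1:]))
--     return 0 if nondec or noninc else 1
-- ===== Notes on version B (the rewrite author's own statement) =====
-- stated objective: simpler
-- what changed: B replaces A's trailing-equal-digit stripping plus a single direction-committed arithmetic scan (with early returns) with building the digit list once and running two full monotonicity scans over adjacent pairs.
import Mathlib
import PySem

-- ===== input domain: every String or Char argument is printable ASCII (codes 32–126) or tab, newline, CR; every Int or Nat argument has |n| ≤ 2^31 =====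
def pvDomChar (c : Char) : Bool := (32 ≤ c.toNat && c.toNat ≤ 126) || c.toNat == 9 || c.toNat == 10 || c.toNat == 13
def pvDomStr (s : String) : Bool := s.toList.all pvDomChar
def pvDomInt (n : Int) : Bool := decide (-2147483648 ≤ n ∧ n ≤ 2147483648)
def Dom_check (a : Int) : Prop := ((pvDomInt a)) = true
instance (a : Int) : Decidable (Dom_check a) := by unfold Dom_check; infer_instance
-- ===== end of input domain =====

-- B builds the digit list once and tests non-decreasing / non-increasing with two full
-- adjacent-pair scans, instead of A's trailing-equal-digit strip + one direction-committed scan.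

-- ===== PORT A =====
-- while a > 0: if a % 10 > last: return 1; last = a % 10; a //= 10  (then return 0)
def checkScanUp (a last : Int) : Int :=
  if h : 0 < a then
    if last < PySem.Int.mod a 10 then 1
    else checkScanUp (PySem.Int.floordiv a 10) (PySem.Int.mod a 10)
  else 0
termination_by a.toNat
decreasing_by rw [PySem.Int.floordiv_eq_ediv_of_pos (by norm_num)]; omega

-- while a > 0: if a % 10 < last: return 1; last = a % 10; a //= 10  (then return 0)
def checkScanDown (a last : Int) : Int :=
  if h : 0 < a then
    if PySem.Int.mod a 10 < last then 1
    else checkScanDown (PySem.Int.floordiv a 10) (PySem.Int.mod a 10)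
  else 0
termination_by a.toNat
decreasing_by rw [PySem.Int.floordiv_eq_ediv_of_pos (by norm_num)]; omega

def check (a : Int) : Int :=
  if h : 100 < a ∧ PySem.Int.mod a 10 = PySem.Int.mod (PySem.Int.floordiv a 10) 10 then
    check (PySem.Int.floordiv a 10)
  else if a ≤ 100 then 0
  else if PySem.Int.mod (PySem.Int.floordiv a 10) 10 < PySem.Int.mod a 10 then
    checkScanUp a (PySem.Int.mod a 10)
  else
    checkScanDown a (PySem.Int.mod a 10)
termination_by a.toNat
decreasing_by rw [PySem.Int.floordiv_eq_ediv_of_pos (by norm_num)]; omega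

-- ===== PORT B =====
-- while n > 0: digits.append(n % 10); n //= 10
def digitsGo (n : Int) (acc : List Int) : List Int :=
  if h : 0 < n then digitsGo (PySem.Int.floordiv n 10) (acc ++ [PySem.Int.mod n 10]) else acc
termination_by n.toNat
decreasing_by rw [PySem.Int.floordiv_eq_ediv_of_pos (by norm_num)]; omega

def check_alt (a : Int) : Int :=
  if a ≤ 100 then 0
  else
    let digits := digitsGo a []
    let nondec := (digits.zip (digits.drop 1)).all (fun p => decide (p.2 ≤ p.1))
    let noninc := (digits.zip (digits.drop 1)).all (fun p => decide (p.1 ≤ p.2))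
    if nondec || noninc then 0 else 1

-- ===== PRECONDITION & SPEC =====
def Spec_check (a : Int) (out : Int) : Prop := out = check_alt a
instance (a : Int) (out : Int) : Decidable (Spec_check a out) := by unfold Spec_check; infer_instance

-- ===== CLAIM (what is proved, stated in full; the proofs are below) =====
def Claim_equal_check : Prop := ∀ (a : Int), Dom_check a → Spec_check a (check a)

-- ===== LEMMAS AND PROOFS =====
theorem fd10 (a : Int) : PySem.Int.floordiv a 10 = a / 10 :=
  PySem.Int.floordiv_eq_ediv_of_pos (by norm_num)
theorem md10 (a : Int) : PySem.Int.mod a 10 = a % 10 :=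
  PySem.Int.mod_eq_emod_of_pos (by norm_num)

-- proof-side digit list (least-significant first)
def digs (n : Int) : List Int :=
  if h : 0 < n then PySem.Int.mod n 10 :: digs (PySem.Int.floordiv n 10) else []
termination_by n.toNat
decreasing_by rw [PySem.Int.floordiv_eq_ediv_of_pos (by norm_num)]; omega

theorem digs_step {n : Int} (h : 0 < n) : digs n = n % 10 :: digs (n / 10) := by
  rw [digs, dif_pos h, md10, fd10]

theorem digs_nil {n : Int} (h : ¬ 0 < n) : digs n = [] := by
  rw [digs, dif_neg h]

def allGE : List Int → Bool
  | x :: y :: r => decide (y ≤ x) && allGE (y :: r)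
  | _ => true

def allLE : List Int → Bool
  | x :: y :: r => decide (x ≤ y) && allLE (y :: r)
  | _ => true

def canon (a : Int) : Int :=
  if a ≤ 100 then 0 else if allGE (digs a) || allLE (digs a) then 0 else 1

theorem digitsGo_eq : ∀ (n : Int) (acc : List Int), digitsGo n acc = acc ++ digs n
  | n, acc => by
    by_cases h : 0 < n
    · rw [digitsGo, dif_pos h, digs, dif_pos h, digitsGo_eq]
      simp
    · rw [digitsGo, dif_neg h, digs, dif_neg h]
      simp
termination_by n _ => n.toNat
decreasing_by rw [PySem.Int.floordiv_eq_ediv_of_pos (by norm_num)]; omega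

theorem zip_allGE : ∀ d : List Int,
    ((d.zip (d.drop 1)).all (fun p => decide (p.2 ≤ p.1))) = allGE d
  | [] => rfl
  | [_] => rfl
  | x :: y :: r => by
    have ih := zip_allGE (y :: r)
    simp only [List.drop_one, List.tail_cons, List.zip_cons_cons, List.all_cons] at *
    rw [ih]; simp [allGE]

theorem zip_allLE : ∀ d : List Int,
    ((d.zip (d.drop 1)).all (fun p => decide (p.1 ≤ p.2))) = allLE d
  | [] => rfl
  | [_] => rfl
  | x :: y :: r => by
    have ih := zip_allLE (y :: r)
    simp only [List.drop_one, List.tail_cons, List.zip_cons_cons, List.all_cons] at *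
    rw [ih]; simp [allLE]

theorem check_alt_eq_canon (a : Int) : check_alt a = canon a := by
  unfold check_alt canon
  by_cases h : a ≤ 100
  · simp [h]
  · simp only [if_neg h]
    rw [digitsGo_eq, List.nil_append, zip_allGE, zip_allLE]

theorem scanUp_eq : ∀ (a last : Int),
    checkScanUp a last = if allGE (last :: digs a) then 0 else 1
  | a, last => by
    by_cases h : 0 < a
    · rw [checkScanUp, dif_pos h, digs, dif_pos h]
      simp only [md10, fd10]
      by_cases h2 : last < a % 10
      · rw [if_pos h2]
        simp [allGE, show ¬ (a % 10 ≤ last) from by omega]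
      · rw [if_neg h2, scanUp_eq]
        simp [allGE, show a % 10 ≤ last from by omega]
    · rw [checkScanUp, dif_neg h, digs, dif_neg h]
      simp [allGE]
termination_by a _ => a.toNat
decreasing_by first | omega | (rw [PySem.Int.floordiv_eq_ediv_of_pos (by norm_num)]; omega)

theorem scanDown_eq : ∀ (a last : Int),
    checkScanDown a last = if allLE (last :: digs a) then 0 else 1
  | a, last => by
    by_cases h : 0 < a
    · rw [checkScanDown, dif_pos h, digs, dif_pos h]
      simp only [md10, fd10]
      by_cases h2 : a % 10 < last
      · rw [if_pos h2]
        simp [allLE, show ¬ (last ≤ a % 10) from by omega]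
      · rw [if_neg h2, scanDown_eq]
        simp [allLE, show last ≤ a % 10 from by omega]
    · rw [checkScanDown, dif_neg h, digs, dif_neg h]
      simp [allLE]
termination_by a _ => a.toNat
decreasing_by first | omega | (rw [PySem.Int.floordiv_eq_ediv_of_pos (by norm_num)]; omega)

theorem allGE_dup (x : Int) (r : List Int) : allGE (x :: x :: r) = allGE (x :: r) := by
  simp [allGE]

theorem allLE_dup (x : Int) (r : List Int) : allLE (x :: x :: r) = allLE (x :: r) := by
  simp [allLE]

-- after a strip step, both monotonicity tests are unchanged
theorem digs_strip {a : Int} (h1 : 100 < a) (h2 : a % 10 = (a / 10) % 10) :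
    digs a = a % 10 :: a % 10 :: digs (a / 10 / 10) ∧
    digs (a / 10) = a % 10 :: digs (a / 10 / 10) := by
  have hq : 0 < a / 10 := by omega
  have hd : digs (a / 10) = a % 10 :: digs (a / 10 / 10) := by
    rw [digs_step hq, ← h2]
  exact ⟨by rw [digs_step (by omega : 0 < a), hd], hd⟩

-- a stripped value that fell to ≤ 100 always has monotone digits
theorem smallM {a : Int} (h1 : 100 < a) (h2 : a % 10 = (a / 10) % 10)
    (h3 : a / 10 ≤ 100) : (allGE (digs a) || allLE (digs a)) = true := by
  obtain ⟨hda, _⟩ := digs_strip h1 h2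
  have hr : 10 ≤ a / 10 := by omega
  by_cases hrr : a / 10 ≤ 99
  · have hq1 : 0 < a / 10 / 10 := by omega
    have hq9 : a / 10 / 10 ≤ 9 := by omega
    have hd2 : digs (a / 10 / 10) = a / 10 / 10 % 10 :: digs (a / 10 / 10 / 10) := digs_step hq1
    rw [digs_nil (by omega : ¬ 0 < a / 10 / 10 / 10)] at hd2
    have hm : a / 10 / 10 % 10 = a / 10 / 10 := by omega
    rw [hm] at hd2
    rw [hda, hd2]
    rcases le_total (a / 10 / 10) (a % 10) with hc | hc <;> simp [allGE, allLE, hc]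
  · have ha : a = 1000 := by omega
    subst ha
    norm_num at hda
    have h10 : digs (10:Int) = 0 :: digs 1 := by
      rw [digs_step (by norm_num)]; norm_num
    have h1' : digs (1:Int) = [1] := by
      rw [digs_step (by norm_num), digs_nil (by norm_num : ¬ (0:Int) < 1/10)]; norm_num
    rw [hda, h10, h1']
    simp [allGE, allLE]

theorem check_eq_canon : ∀ a : Int, check a = canon a
  | a => by
    rw [check]
    by_cases h : 100 < a ∧ PySem.Int.mod a 10 = PySem.Int.mod (PySem.Int.floordiv a 10) 10
    · rw [dif_pos h, check_eq_canon]
      obtain ⟨h1, h2⟩ := h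
      rw [md10, fd10, md10] at h2
      rw [fd10]
      unfold canon
      rw [if_neg (by omega : ¬ a ≤ 100)]
      by_cases hle : a / 10 ≤ 100
      · rw [if_pos hle, smallM h1 h2 hle]
        simp
      · rw [if_neg hle]
        obtain ⟨hda, hdr⟩ := digs_strip h1 h2
        rw [hda, hdr, allGE_dup, allLE_dup]
    · rw [dif_neg h]
      by_cases hle : a ≤ 100
      · rw [if_pos hle]
        unfold canon
        rw [if_pos hle]
      · rw [if_neg hle]
        push_neg at h
        have hne : a % 10 ≠ (a / 10) % 10 := by
          intro heq
          exact absurd (by rw [md10, fd10, md10]; exact heq) (h (by omega))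
        have hq : 0 < a / 10 := by omega
        have hda : digs a = a % 10 :: (a / 10) % 10 :: digs (a / 10 / 10) := by
          rw [digs_step (by omega : 0 < a), digs_step hq]
        unfold canon
        rw [if_neg hle]
        by_cases hgt : PySem.Int.mod (PySem.Int.floordiv a 10) 10 < PySem.Int.mod a 10
        · rw [if_pos hgt, scanUp_eq]
          rw [md10, fd10, md10] at hgt
          have hLE : allLE (digs a) = false := by
            rw [hda]; simp [allLE]; omega
          rw [hda, md10, allGE_dup, ← hda, hLE]
          simp
        · rw [if_neg hgt, scanDown_eq]
          rw [md10, fd10, md10] at hgt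
          push_neg at hgt
          have hlt : a % 10 < (a / 10) % 10 := lt_of_le_of_ne hgt hne
          have hGE : allGE (digs a) = false := by
            rw [hda]; simp [allGE]; omega
          rw [hda, md10, allLE_dup, ← hda, hGE]
          simp
termination_by a => a.toNat
decreasing_by rw [PySem.Int.floordiv_eq_ediv_of_pos (by norm_num)]; omega

-- ===== VERDICT (by name: the statement is the Claim_ definition above) =====
theorem check_spec : Claim_equal_check := by
  intro a _
  unfold Spec_check
  rw [check_eq_canon, check_alt_eq_canon]
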